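-- pv_equiv track=rewrite | github.com/david-chan11/DavidChan | CHAN_SET4/CHAN_SET4.py | telephone_decipher
-- ===== SOURCE A (Python) =====
-- def telephone_decipher(telephone_string):
--
--     decipher_dict = {
--         "0":" ",
--         '2': 'A',
--         '22': 'B',
--         '222': 'C',
--         '3': 'D',
--         '33': 'E',
--         '333': 'F',
--         '4': 'G',
--         '44': 'H',
--         '444': 'I',
--         '5': 'J',
--         '55': 'K',
--         '555': 'L',
--         '6': 'M',
--         '66': 'N',
--         '666': 'O',
--         '7': 'P',
--         '77': 'Q',
--         '777': 'R',
--         '7777': 'S',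
--         '8': 'T',
--         '88': 'U',
--         '888': 'V',
--         '9': 'W',
--         '99': 'X',
--         '999': 'Y',
--         '9999': 'Z'
--     }
--     # Initialize
--     decrypted_message = []
--     i = 0
--
--     while i < len(telephone_string): # Loop while the the character index is less than the length of the string
--         index_start = i
--         while i < len(telephone_string) - 1 and telephone_string[i] == telephone_string[i + 1]:# Loop from start to end index
--             i += 1
--         index_end = i + 1
--         number_key = telephone_string[index_start:index_end]
--         if "_" not in number_key: #Ignore the underscore and add the letter conversion to the message
--             decrypted_message.append(decipher_dict[number_key])
--
--         i += 1 # Check the next number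
--
--     return "".join(decrypted_message) #Concatenate the letters in the list
-- ===== SOURCE B (Python) =====
-- def telephone_decipher(telephone_string):
--     # Single pass with a pending-run accumulator; letters computed by
--     # arithmetic indexing into per-digit letter strings instead of a
--     # repetition-keyed dict.
--     letters = {
--         '2': 'ABC', '3': 'DEF', '4': 'GHI', '5': 'JKL',
--         '6': 'MNO', '7': 'PQRS', '8': 'TUV', '9': 'WXYZ',
--     }
--     out = []
--
--     def emit(ch, n):
--         if ch is None or ch == '_' or n == 0:
--             return
--         if ch == '0':
--             out.append(' ')
--         else:
--             out.append(letters[ch][n - 1])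
--
--     prev, count = None, 0
--     for ch in telephone_string:
--         if ch == prev:
--             count += 1
--         else:
--             emit(prev, count)
--             prev, count = ch, 1
--     emit(prev, count)
--     return ''.join(out)
-- ===== Notes on version B (the rewrite author's own statement) =====
-- stated objective: alternative
-- what changed: Replaces A's nested while-loops with index arithmetic, string slicing and a 27-entry repetition-keyed dict by a single pass with a pending-run accumulator that computes each letter by arithmetic indexing into one 3-4 letter string per digit.
import Mathlib
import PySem

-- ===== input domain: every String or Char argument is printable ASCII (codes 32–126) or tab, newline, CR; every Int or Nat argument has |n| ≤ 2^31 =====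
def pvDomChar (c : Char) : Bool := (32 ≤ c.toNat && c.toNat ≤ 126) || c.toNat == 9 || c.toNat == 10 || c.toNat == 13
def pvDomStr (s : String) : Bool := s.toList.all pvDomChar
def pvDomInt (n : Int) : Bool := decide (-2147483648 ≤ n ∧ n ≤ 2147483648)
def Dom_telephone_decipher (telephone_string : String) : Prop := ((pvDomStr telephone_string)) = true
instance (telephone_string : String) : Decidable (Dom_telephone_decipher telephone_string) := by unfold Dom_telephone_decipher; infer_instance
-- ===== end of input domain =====

-- B replaces A's nested while-loops, slice and repetition-keyed 27-entry dict by one pass with a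
-- pending-run accumulator computing each letter by arithmetic indexing into per-digit letter strings
-- (objective: alternative, same O(n) cost).


-- ===== PORT A =====
def decipherDict : PySem.Dict String String := PySem.Dict.ofList
  [("0", " "),
   ("2", "A"), ("22", "B"), ("222", "C"),
   ("3", "D"), ("33", "E"), ("333", "F"),
   ("4", "G"), ("44", "H"), ("444", "I"),
   ("5", "J"), ("55", "K"), ("555", "L"),
   ("6", "M"), ("66", "N"), ("666", "O"),
   ("7", "P"), ("77", "Q"), ("777", "R"), ("7777", "S"),
   ("8", "T"), ("88", "U"), ("888", "V"),
   ("9", "W"), ("99", "X"), ("999", "Y"), ("9999", "Z")]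

-- the inner while loop: advance i while i < len-1 and s[i] == s[i+1]
def innerA (s : List Char) (i : Nat) : Nat :=
  if h : i < s.length - 1 ∧ PySem.List.pyGet? s (i : Int) = PySem.List.pyGet? s ((i : Int) + 1) then
    innerA s (i + 1)
  else i
termination_by s.length - i
decreasing_by omega

-- needed for loopA's termination; the outer loop advances past innerA
theorem innerA_ge_aux (s : List Char) (m : Nat) :
    ∀ i, s.length - i ≤ m → i ≤ innerA s i := by
  induction m with
  | zero =>
    intro i h; rw [innerA, dif_neg]; intro hc; omega
  | succ m ih =>
    intro i h; rw [innerA]; split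
    · rename_i hc; have := ih (i + 1) (by omega); omega
    · exact le_rfl

theorem innerA_ge (s : List Char) (i : Nat) : i ≤ innerA s i :=
  innerA_ge_aux s s.length i (Nat.sub_le _ _)

-- the outer while loop; `none` is Python's KeyError (excluded by Pre_)
def loopA (s : List Char) (i : Nat) (acc : List String) : Option (List String) :=
  if _hi : i < s.length then
    let j := innerA s i
    let key := PySem.List.slice s (some (i : Int)) (some ((j + 1 : Nat) : Int))
    if PySem.Chars.isIn ['_'] key then loopA s (j + 1) acc
    else
      match PySem.Dict.get? decipherDict (String.ofList key) with
      | some v => loopA s (j + 1) (acc ++ [v])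
      | none => none
  else some acc
termination_by s.length - i
decreasing_by all_goals (have := innerA_ge s i; omega)

def telephone_decipher (telephone_string : String) : String :=
  match loopA telephone_string.toList 0 [] with
  | some msg => PySem.Str.join "" msg
  | none => ""   -- Python raises KeyError here; excluded by Pre_

-- ===== PORT B =====
def lettersB : PySem.Dict Char String := PySem.Dict.ofList
  [('2', "ABC"), ('3', "DEF"), ('4', "GHI"), ('5', "JKL"),
   ('6', "MNO"), ('7', "PQRS"), ('8', "TUV"), ('9', "WXYZ")]

-- what one call of Source B's emit(ch, n) appends to out
def pieceB (ch : Option Char) (n : Nat) : List String :=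
  match ch with
  | none => []
  | some c =>
    if c = '_' ∨ n = 0 then []
    else if c = '0' then [" "]
    else
      match PySem.Dict.get? lettersB c with
      | some w =>
        match PySem.Str.pyGet? w ((n : Int) - 1) with
        | some c2 => [String.ofList [c2]]
        | none => []   -- Python raises IndexError here; excluded by Pre_
      | none => []     -- Python raises KeyError here; excluded by Pre_

def emitB (ch : Option Char) (n : Nat) (out : List String) : List String :=
  out ++ pieceB ch n

def stepB (st : Option Char × Nat × List String) (ch : Char) : Option Char × Nat × List String :=
  if some ch = st.1 then (st.1, st.2.1 + 1, st.2.2)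
  else (some ch, 1, emitB st.1 st.2.1 st.2.2)

def telephone_decipher_alt (telephone_string : String) : String :=
  let st := telephone_string.toList.foldl stepB (none, 0, [])
  PySem.Str.join "" (emitB st.1 st.2.1 st.2.2)

-- ===== PRECONDITION & SPEC =====
-- run-length encoding: the maximal runs of the string (structural, with a pending-run accumulator)
def rleAux : List Char → Char → Nat → List (Char × Nat)
  | [], c, k => [(c, k)]
  | d :: t, c, k => if d = c then rleAux t c (k + 1) else (c, k) :: rleAux t d 1

def rleRuns : List Char → List (Char × Nat)
  | [] => []
  | c :: t => rleAux t c 1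

-- a maximal run on which A does not raise: underscores, or a key of the keypad table
def validRunB (p : Char × Nat) : Bool :=
  p.1 == '_' || (p.1 == '0' && p.2 == 1)
  || ((p.1 == '2' || p.1 == '3' || p.1 == '4' || p.1 == '5' || p.1 == '6' || p.1 == '8')
      && decide (1 ≤ p.2) && decide (p.2 ≤ 3))
  || ((p.1 == '7' || p.1 == '9') && decide (1 ≤ p.2) && decide (p.2 ≤ 4))

-- Pre_ excludes exactly the inputs on which A raises KeyError (a maximal run that is neither
-- underscores nor a key of the table)
def Pre_telephone_decipher (telephone_string : String) : Prop :=
  ∀ p ∈ rleRuns telephone_string.toList, validRunB p = true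

instance (telephone_string : String) : Decidable (Pre_telephone_decipher telephone_string) := by
  unfold Pre_telephone_decipher; infer_instance

def pvWitness_telephone_decipher : String := "4433555_555666"

def Spec_telephone_decipher (telephone_string : String) (out : String) : Prop := out = telephone_decipher_alt telephone_string
instance (telephone_string : String) (out : String) : Decidable (Spec_telephone_decipher telephone_string out) := by unfold Spec_telephone_decipher; infer_instance

-- ===== CLAIM (what is proved, stated in full; the proofs are below) =====
def Claim_equal_telephone_decipher : Prop := ∀ (telephone_string : String), Dom_telephone_decipher telephone_string → Pre_telephone_decipher telephone_string → Spec_telephone_decipher telephone_string (telephone_decipher telephone_string)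

-- ===== LEMMAS AND PROOFS =====

-- length of the leading run of character c
def leadRun (c : Char) : List Char → Nat
  | [] => 0
  | d :: t => if d = c then leadRun c t + 1 else 0


-- reference decoding of the run list, A-style: option-valued lookup per run
def decodeA : List (Char × Nat) → Option (List String)
  | [] => some []
  | (c, k) :: ps =>
    if c = '_' then decodeA ps
    else (PySem.Dict.get? decipherDict (String.ofList (List.replicate k c))).bind
           fun v => (decodeA ps).map (fun xs => v :: xs)

-- reference decoding of the run list, B-style
def piecesB (ps : List (Char × Nat)) : List String :=
  ps.flatMap (fun p => pieceB (some p.1) p.2)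

theorem take_leadRun (c : Char) (t : List Char) :
    t.take (leadRun c t) = List.replicate (leadRun c t) c := by
  induction t with
  | nil => simp [leadRun]
  | cons d t ih =>
    by_cases h : d = c
    · subst h; simp [leadRun, ih, List.replicate_succ]
    · simp [leadRun, h]

theorem rleAux_eq (t : List Char) (c : Char) (k : Nat) :
    rleAux t c k = (c, k + leadRun c t) :: rleRuns (t.drop (leadRun c t)) := by
  induction t generalizing c k with
  | nil => simp [rleAux, leadRun, rleRuns]
  | cons d t ih =>
    by_cases hdc : d = c
    · subst hdc
      rw [rleAux, if_pos rfl, ih d (k + 1)]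
      simp only [leadRun, ite_true, List.drop_succ_cons]
      have : k + 1 + leadRun d t = k + (leadRun d t + 1) := by omega
      rw [this]
    · rw [rleAux, if_neg hdc]
      simp [leadRun, hdc, rleRuns]

theorem rleRuns_cons (c : Char) (t : List Char) :
    rleRuns (c :: t) = (c, leadRun c t + 1) :: rleRuns (t.drop (leadRun c t)) := by
  rw [rleRuns, rleAux_eq]
  simp [Nat.add_comm]

theorem innerA_eq (t : List Char) (c : Char) (s : List Char) (i : Nat)
    (h : s.drop i = c :: t) : innerA s i = i + leadRun c t := by
  induction t generalizing i c with
  | nil =>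
    have hlen : s.length = i + 1 := by
      have := congrArg List.length h; simp at this; omega
    rw [innerA, dif_neg, leadRun]; · omega
    intro hc; omega
  | cons d t ih =>
    have hlen : s.length = i + 2 + t.length := by
      have := congrArg List.length h; simp at this; omega
    have hgi : PySem.List.pyGet? s (i : Int) = some c := by
      rw [PySem.List.pyGet?_natCast]
      have : s[i]? = (s.drop i)[0]? := by simp [List.getElem?_drop]
      rw [this, h]; rfl
    have hgi1 : PySem.List.pyGet? s ((i : Int) + 1) = some d := by
      have : ((i : Int) + 1) = ((i + 1 : Nat) : Int) := by push_cast; ring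
      rw [this, PySem.List.pyGet?_natCast]
      have : s[i + 1]? = (s.drop i)[1]? := by simp [List.getElem?_drop]
      rw [this, h]; rfl
    by_cases hdc : d = c
    · subst hdc
      rw [innerA, dif_pos ⟨by omega, by rw [hgi, hgi1]⟩]
      have hdrop : s.drop (i + 1) = d :: t := by
        have h2 := congrArg (List.drop 1) h
        simpa [List.drop_drop, Nat.add_comm] using h2
      rw [ih d (i + 1) hdrop]
      simp [leadRun]; omega
    · rw [innerA, dif_neg, leadRun]
      · simp [hdc]
      intro hc
      rw [hgi, hgi1] at hc
      exact hdc (by simpa using hc.2.symm)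

theorem leadRun_le (c : Char) (t : List Char) : leadRun c t ≤ t.length := by
  induction t with
  | nil => simp [leadRun]
  | cons d t ih =>
    by_cases h : d = c
    · simp only [leadRun, if_pos h, List.length_cons]; omega
    · simp [leadRun, h]

theorem isIn_underscore_replicate (k : Nat) (c : Char) :
    PySem.Chars.isIn ['_'] (List.replicate (k + 1) c) = true ↔ c = '_' := by
  rw [PySem.Chars.isIn_iff_infix]
  constructor
  · intro hinf
    have : '_' ∈ List.replicate (k + 1) c := hinf.subset (by simp)
    exact ((List.eq_of_mem_replicate this)).symm
  · intro hc; subst hc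
    exact ⟨[], List.replicate k '_', by simp [List.replicate_succ]⟩

theorem loopA_eq (n : Nat) (l : List Char) (hn : l.length ≤ n) (s : List Char) (i : Nat)
    (acc : List String) (h : s.drop i = l) :
    loopA s i acc = (decodeA (rleRuns l)).map (fun xs => acc ++ xs) := by
  induction n generalizing l s i acc with
  | zero =>
    have : l = [] := by rw [Nat.le_zero] at hn; exact List.eq_nil_of_length_eq_zero hn
    subst this
    have hge : s.length ≤ i := by
      have := congrArg List.length h; simp at this; omega
    rw [loopA, dif_neg (by omega)]
    simp [rleRuns, decodeA]
  | succ n ih =>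
    match l with
    | [] =>
      have hge : s.length ≤ i := by
        have := congrArg List.length h; simp at this; omega
      rw [loopA, dif_neg (by omega)]
      simp [rleRuns, decodeA]
    | c :: t =>
      have hlen : s.length = i + 1 + t.length := by
        have := congrArg List.length h; simp at this; omega
      set k := leadRun c t with hk
      have hkt : k ≤ t.length := hk ▸ leadRun_le c t
      have hj : innerA s i = i + k := innerA_eq t c s i h
      have hkey : PySem.List.slice s (some (i : Int)) (some ((innerA s i + 1 : Nat) : Int))
          = List.replicate (k + 1) c := by
        rw [PySem.List.slice_natCast]
        have h1 : innerA s i + 1 - i = k + 1 := by omega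
        rw [h1, h, List.take_succ_cons, hk, take_leadRun]
        simp [List.replicate_succ, ← hk]
      have hdrop2 : s.drop (innerA s i + 1) = t.drop k := by
        rw [hj]
        have h2 := congrArg (List.drop (k + 1)) h
        rw [List.drop_drop] at h2
        have he : i + (k + 1) = i + k + 1 := by omega
        rw [he] at h2
        simpa using h2
      have hlt : (t.drop k).length ≤ n := by simp at hn ⊢; omega
      rw [loopA, dif_pos (by omega)]
      rw [hj] at hkey
      simp only [hj, hkey]
      rw [rleRuns_cons]
      rw [← hk]
      by_cases hc : c = '_'
      · rw [if_pos (by rw [isIn_underscore_replicate]; exact hc)]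
        rw [ih (t.drop k) hlt s (i + k + 1) acc (by rw [← hdrop2, hj])]
        simp [decodeA, hc]
      · rw [if_neg (by rw [isIn_underscore_replicate]; simpa using hc)]
        rw [decodeA, if_neg hc]
        cases hlook : PySem.Dict.get? decipherDict (String.ofList (List.replicate (k + 1) c)) with
        | none => simp
        | some v =>
          show loopA s (i + k + 1) (acc ++ [v]) = _
          rw [ih (t.drop k) hlt s (i + k + 1) (acc ++ [v]) (by rw [← hdrop2, hj])]
          cases decodeA (rleRuns (t.drop k)) <;> simp

theorem foldB_eq (l : List Char) (c : Char) (k : Nat) (out : List String) :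
    (fun st => emitB st.1 st.2.1 st.2.2) (l.foldl stepB (some c, k, out))
      = out ++ pieceB (some c) (k + leadRun c l) ++ piecesB (rleRuns (l.drop (leadRun c l))) := by
  induction l generalizing c k out with
  | nil => simp [leadRun, rleRuns, piecesB, emitB]
  | cons d t ih =>
    by_cases hdc : d = c
    · subst hdc
      rw [List.foldl_cons, stepB, if_pos rfl]
      rw [ih d (k + 1) out]
      simp only [leadRun, ite_true, List.drop_succ_cons]
      have : k + (leadRun d t + 1) = k + 1 + leadRun d t := by omega
      rw [this]
    · rw [List.foldl_cons, stepB, if_neg (by simp [hdc])]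
      rw [ih d 1 (emitB (some c) k out)]
      simp only [leadRun, if_neg hdc, Nat.add_zero, List.drop_zero]
      rw [rleRuns_cons]
      simp only [piecesB, List.flatMap_cons, emitB]
      have : (1 : Nat) + leadRun d t = leadRun d t + 1 := by omega
      rw [this]
      simp [List.append_assoc]

theorem alt_eq (t : String) :
    telephone_decipher_alt t = PySem.Str.join "" (piecesB (rleRuns t.toList)) := by
  rw [telephone_decipher_alt]
  cases h : t.toList with
  | nil => simp [rleRuns, piecesB, emitB, pieceB]
  | cons c t' =>
    rw [List.foldl_cons, stepB, if_neg (by simp)]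
    have h0 : emitB none 0 [] = [] := by simp [emitB, pieceB]
    rw [h0]
    have := foldB_eq t' c 1 []
    simp only at this
    rw [this]
    rw [rleRuns_cons]
    simp only [piecesB, List.flatMap_cons]
    have : (1 : Nat) + leadRun c t' = leadRun c t' + 1 := by omega
    rw [this]
    simp

theorem run_bridge_dec :
    (['0', '2', '3', '4', '5', '6', '7', '8', '9'].all fun c =>
      ([1, 2, 3, 4].all fun k =>
        !(validRunB (c, k)) ||
        ((PySem.Dict.get? decipherDict (String.ofList (List.replicate k c))
            == (pieceB (some c) k).head?)
         && (pieceB (some c) k).length == 1))) = true := by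
  decide

theorem run_bridge : ∀ c ∈ ['0', '2', '3', '4', '5', '6', '7', '8', '9'],
    ∀ k ∈ [1, 2, 3, 4], validRunB (c, k) = true →
      ∃ v, PySem.Dict.get? decipherDict (String.ofList (List.replicate k c)) = some v ∧
        pieceB (some c) k = [v] := by
  intro c hc k hk hv
  have h := run_bridge_dec
  rw [List.all_eq_true] at h
  have h2 := h c hc
  rw [List.all_eq_true] at h2
  have h3 := h2 k hk
  simp only [hv, Bool.not_true, Bool.false_or, Bool.and_eq_true, beq_iff_eq] at h3
  obtain ⟨h1, hlen⟩ := h3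
  obtain ⟨v, hveq⟩ := List.length_eq_one_iff.mp hlen
  exact ⟨v, by rw [h1, hveq]; rfl, hveq⟩

theorem decodeA_eq_piecesB (ps : List (Char × Nat)) (h : ∀ p ∈ ps, validRunB p = true) :
    decodeA ps = some (piecesB ps) := by
  induction ps with
  | nil => simp [decodeA, piecesB]
  | cons p ps ih =>
    obtain ⟨c, k⟩ := p
    have hv : validRunB (c, k) = true := h _ (List.mem_cons_self ..)
    have hrest := ih (fun q hq => h q (List.mem_cons_of_mem _ hq))
    by_cases hc : c = '_'
    · subst hc
      rw [decodeA, if_pos rfl, hrest]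
      simp [piecesB, pieceB]
    · have hmem : c ∈ ['0', '2', '3', '4', '5', '6', '7', '8', '9'] ∧ k ∈ [1, 2, 3, 4] := by
        simp only [validRunB, Bool.or_eq_true, Bool.and_eq_true, beq_iff_eq,
          decide_eq_true_eq] at hv
        rcases hv with ((h1 | h1) | h1) | h1
        · exact absurd h1 hc
        · simp [h1.1, h1.2]
        · obtain ⟨⟨hm, h2⟩, h3⟩ := h1
          constructor
          · rcases hm with ((((h | h) | h) | h) | h) | h <;> simp [h]
          · simp; omega
        · obtain ⟨⟨hm, h2⟩, h3⟩ := h1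
          constructor
          · rcases hm with h | h <;> simp [h]
          · simp; omega
      obtain ⟨v, hvv, hp⟩ := run_bridge c hmem.1 k hmem.2 hv
      rw [decodeA, if_neg hc, hvv, hrest]
      simp [piecesB, hp]

-- ===== VERDICT (by name: the statement is the Claim_ definition above) =====
theorem telephone_decipher_spec : Claim_equal_telephone_decipher := by
  intro t _ hpre
  show telephone_decipher t = telephone_decipher_alt t
  have hA := loopA_eq t.toList.length t.toList le_rfl t.toList 0 [] (by simp)
  rw [decodeA_eq_piecesB _ hpre] at hA
  rw [telephone_decipher, hA, alt_eq]
  simp
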